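-- pv_equiv track=rewrite | github.com/Specht1000/Crossword-AI | src/grid.py | find_free_spaces
-- ===== SOURCE A (Python) =====
-- from typing import List, Tuple, Dict
--
-- def find_free_spaces(grid: List[List[str]]) -> List[Tuple[int, int, int, str, int, int]]:
--     free_spaces: List[Tuple[int, int, int, str, int, int]] = []
--
--     # Detectar espaços horizontais
--     for row in range(len(grid)):
--         col = 0
--         while col < len(grid[0]):
--             if grid[row][col] != '.':  # Considera todos os caracteres exceto '.'
--                 start_col = col
--                 fixed_letters: int = 0  # Contador de letras fixas
--                 intersecoes: int = 0  # Contador de interseções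
--                 while col < len(grid[0]) and grid[row][col] != '.':
--                     if grid[row][col] != '?':  # Conta letras já fixas
--                         fixed_letters += 1
--                     if row > 0 and grid[row - 1][col] != '.' and grid[row - 1][col] != '?':
--                         intersecoes += 1  # Incrementa se há interseções acima
--                     if row < len(grid) - 1 and grid[row + 1][col] != '.' and grid[row + 1][col] != '?':
--                         intersecoes += 1  # Incrementa se há interseções abaixo
--                     col += 1
--                 if col - start_col > 1:
--                     free_spaces.append((row, start_col, col - start_col, 'H', fixed_letters, intersecoes))
--             else:
--                 col += 1
--
--     # Detectar espaços verticais
--     for col in range(len(grid[0])):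
--         row = 0
--         while row < len(grid):
--             if grid[row][col] != '.':
--                 start_row = row
--                 fixed_letters = 0
--                 intersecoes = 0
--                 while row < len(grid) and grid[row][col] != '.':
--                     if grid[row][col] != '?':
--                         fixed_letters += 1
--                     if col > 0 and grid[row][col - 1] != '.' and grid[row][col - 1] != '?':
--                         intersecoes += 1
--                     if col < len(grid[0]) - 1 and grid[row][col + 1] != '.' and grid[row][col + 1] != '?':
--                         intersecoes += 1
--                     row += 1
--                 if row - start_row > 1:
--                     free_spaces.append((start_row, col, row - start_row, 'V', fixed_letters, intersecoes))
--             else: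
--                 row += 1
--
--     # Ordena por interseções, depois comprimento, depois letras fixas
--     free_spaces.sort(key=lambda x: (-x[5], -x[2], -x[4]))
--     return free_spaces
-- ===== SOURCE B (Python) =====
-- from typing import List, Tuple
--
-- def find_free_spaces(grid: List[List[str]]) -> List[Tuple[int, int, int, str, int, int]]:
--     h = len(grid)
--     w = len(grid[0])
--     spaces: List[Tuple[int, int, int, str, int, int]] = []
--     # Horizontal: one flat pass per row; cells are grouped by a segment id
--     # (the number of '.' seen so far in the row) into a dict of aggregates.
--     for r in range(h):
--         segs = {}
--         dots = 0
--         for c in range(w):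
--             v = grid[r][c]
--             if v == '.':
--                 dots += 1
--                 continue
--             if dots not in segs:
--                 segs[dots] = (c, 0, 0, 0)
--             start, length, fixed, inter = segs[dots]
--             length += 1
--             if v != '?':
--                 fixed += 1
--             if r > 0 and grid[r - 1][c] not in ('.', '?'):
--                 inter += 1
--             if r < h - 1 and grid[r + 1][c] not in ('.', '?'):
--                 inter += 1
--             segs[dots] = (start, length, fixed, inter)
--         for start, length, fixed, inter in segs.values():
--             if length > 1:
--                 spaces.append((r, start, length, 'H', fixed, inter))
--     # Vertical: same group-by aggregation down each column.
--     for c in range(w):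
--         segs = {}
--         dots = 0
--         for r in range(h):
--             v = grid[r][c]
--             if v == '.':
--                 dots += 1
--                 continue
--             if dots not in segs:
--                 segs[dots] = (r, 0, 0, 0)
--             start, length, fixed, inter = segs[dots]
--             length += 1
--             if v != '?':
--                 fixed += 1
--             if c > 0 and grid[r][c - 1] not in ('.', '?'):
--                 inter += 1
--             if c < w - 1 and grid[r][c + 1] not in ('.', '?'):
--                 inter += 1
--             segs[dots] = (start, length, fixed, inter)
--         for start, length, fixed, inter in segs.values():
--             if length > 1:
--                 spaces.append((start, c, length, 'V', fixed, inter))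
--     spaces.sort(key=lambda x: (-x[5], -x[2], -x[4]))
--     return spaces
-- ===== Notes on version B (the rewrite author's own statement) =====
-- stated objective: alternative
-- what changed: A discovers each free space with nested while-loops that locate a run's boundaries and accumulate its counters while advancing an index; B never finds run boundaries at all: it makes one flat pass over the cells of each row/column, labelling every non-'.' cell with a segment id (the running count of '.' cells seen so far in that line) and aggregating (start, length, fixed, intersections) per id in a dictionary, then emits the dict's values, with the identical final sort.
import Mathlib
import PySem

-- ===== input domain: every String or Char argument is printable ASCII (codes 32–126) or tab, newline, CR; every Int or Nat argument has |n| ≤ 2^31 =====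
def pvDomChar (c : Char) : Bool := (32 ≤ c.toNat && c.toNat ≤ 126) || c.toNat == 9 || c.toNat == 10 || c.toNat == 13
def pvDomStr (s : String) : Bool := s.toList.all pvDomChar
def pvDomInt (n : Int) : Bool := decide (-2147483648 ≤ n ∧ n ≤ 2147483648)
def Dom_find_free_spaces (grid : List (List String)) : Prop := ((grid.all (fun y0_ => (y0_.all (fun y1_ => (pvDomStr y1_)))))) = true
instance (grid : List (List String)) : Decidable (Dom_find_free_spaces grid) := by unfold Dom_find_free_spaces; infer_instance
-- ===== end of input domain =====

-- B replaces A's boundary-finding while-loops by a per-line group-by: every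
-- non-'.' cell is labelled with a segment id (the running '.' count) and its
-- statistics are aggregated in a dict; objective: alternative decomposition (not faster).

-- shared cell access: grid[r][c]; the "" default is only reached outside Pre_
def pvCell (g : List (List String)) (r c : Nat) : String := (g.getD r []).getD c ""

-- sort key (-x[5], -x[2], -x[4]) with Python's lexicographic tuple order
def pvKey (x : Int × Int × Int × String × Int × Int) : Lex (Int × Lex (Int × Int)) :=
  toLex (-x.2.2.2.2.2, toLex (-x.2.2.1, -x.2.2.2.2.1))

-- ===== PORT A =====
-- inner `while col < len(grid[0]) and grid[row][col] != '.'` of the horizontal pass;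
-- the fuel argument only makes the loop total and is always sufficient at the call site
def hrunA (g : List (List String)) (row h w : Nat) : Nat → Nat → Int → Int → Nat × Int × Int
  | 0, col, fixed, inter => (col, fixed, inter)
  | fuel + 1, col, fixed, inter =>
    if col < w ∧ pvCell g row col ≠ "." then
      hrunA g row h w fuel (col + 1)
        (if pvCell g row col ≠ "?" then fixed + 1 else fixed)
        (inter
          + (if 0 < row ∧ pvCell g (row - 1) col ≠ "." ∧ pvCell g (row - 1) col ≠ "?" then 1 else 0)
          + (if row < h - 1 ∧ pvCell g (row + 1) col ≠ "." ∧ pvCell g (row + 1) col ≠ "?" then 1 else 0))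
    else (col, fixed, inter)

-- outer `while col < len(grid[0])` of the horizontal pass
def hscanA (g : List (List String)) (row h w : Nat) :
    Nat → Nat → List (Int × Int × Int × String × Int × Int) →
    List (Int × Int × Int × String × Int × Int)
  | 0, _, acc => acc
  | fuel + 1, col, acc =>
    if col < w then
      if pvCell g row col ≠ "." then
        let r := hrunA g row h w (fuel + 1) col 0 0
        hscanA g row h w fuel r.1
          (if 1 < r.1 - col then
            acc ++ [((row : Int), (col : Int), ((r.1 - col : Nat) : Int), "H", r.2.1, r.2.2)]
          else acc)
      else hscanA g row h w fuel (col + 1) acc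
    else acc

-- inner `while row < len(grid) and grid[row][col] != '.'` of the vertical pass
def vrunA (g : List (List String)) (col h w : Nat) : Nat → Nat → Int → Int → Nat × Int × Int
  | 0, row, fixed, inter => (row, fixed, inter)
  | fuel + 1, row, fixed, inter =>
    if row < h ∧ pvCell g row col ≠ "." then
      vrunA g col h w fuel (row + 1)
        (if pvCell g row col ≠ "?" then fixed + 1 else fixed)
        (inter
          + (if 0 < col ∧ pvCell g row (col - 1) ≠ "." ∧ pvCell g row (col - 1) ≠ "?" then 1 else 0)
          + (if col < w - 1 ∧ pvCell g row (col + 1) ≠ "." ∧ pvCell g row (col + 1) ≠ "?" then 1 else 0))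
    else (row, fixed, inter)

-- outer `while row < len(grid)` of the vertical pass
def vscanA (g : List (List String)) (col h w : Nat) :
    Nat → Nat → List (Int × Int × Int × String × Int × Int) →
    List (Int × Int × Int × String × Int × Int)
  | 0, _, acc => acc
  | fuel + 1, row, acc =>
    if row < h then
      if pvCell g row col ≠ "." then
        let r := vrunA g col h w (fuel + 1) row 0 0
        vscanA g col h w fuel r.1
          (if 1 < r.1 - row then
            acc ++ [((row : Int), (col : Int), ((r.1 - row : Nat) : Int), "V", r.2.1, r.2.2)]
          else acc)
      else vscanA g col h w fuel (row + 1) acc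
    else acc

def find_free_spaces (grid : List (List String)) : List (Int × Int × Int × String × Int × Int) :=
  let horiz := (List.range grid.length).foldl
    (fun acc row =>
      hscanA grid row grid.length (grid.getD 0 []).length (grid.getD 0 []).length 0 acc) []
  let all := (List.range (grid.getD 0 []).length).foldl
    (fun acc col => vscanA grid col grid.length (grid.getD 0 []).length grid.length 0 acc) horiz
  PySem.List.sorted all pvKey

-- ===== PORT B =====
-- one cell of the horizontal group-by pass; state = (segment dict keyed by the
-- running '.' count, that count)
def hstepB (g : List (List String)) (r h : Nat)
    (st : PySem.Dict Int (Int × Int × Int × Int) × Int) (c : Nat) :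
    PySem.Dict Int (Int × Int × Int × Int) × Int :=
  let v := pvCell g r c
  if v = "." then (st.1, st.2 + 1)
  else
    let segs := if st.1.contains st.2 then st.1 else st.1.insert st.2 ((c : Int), 0, 0, 0)
    let rec0 := segs.getD st.2 (0, 0, 0, 0)
    (segs.insert st.2
      (rec0.1, rec0.2.1 + 1,
        (if v ≠ "?" then rec0.2.2.1 + 1 else rec0.2.2.1),
        rec0.2.2.2
          + (if 0 < r ∧ pvCell g (r - 1) c ≠ "." ∧ pvCell g (r - 1) c ≠ "?" then 1 else 0)
          + (if r < h - 1 ∧ pvCell g (r + 1) c ≠ "." ∧ pvCell g (r + 1) c ≠ "?" then 1 else 0)),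
     st.2)

-- one cell of the vertical group-by pass
def vstepB (g : List (List String)) (c w : Nat)
    (st : PySem.Dict Int (Int × Int × Int × Int) × Int) (r : Nat) :
    PySem.Dict Int (Int × Int × Int × Int) × Int :=
  let v := pvCell g r c
  if v = "." then (st.1, st.2 + 1)
  else
    let segs := if st.1.contains st.2 then st.1 else st.1.insert st.2 ((r : Int), 0, 0, 0)
    let rec0 := segs.getD st.2 (0, 0, 0, 0)
    (segs.insert st.2
      (rec0.1, rec0.2.1 + 1,
        (if v ≠ "?" then rec0.2.2.1 + 1 else rec0.2.2.1),
        rec0.2.2.2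
          + (if 0 < c ∧ pvCell g r (c - 1) ≠ "." ∧ pvCell g r (c - 1) ≠ "?" then 1 else 0)
          + (if c < w - 1 ∧ pvCell g r (c + 1) ≠ "." ∧ pvCell g r (c + 1) ≠ "?" then 1 else 0)),
     st.2)

def find_free_spaces_alt (grid : List (List String)) : List (Int × Int × Int × String × Int × Int) :=
  let h := grid.length
  let w := (grid.getD 0 []).length
  let horiz := (List.range h).foldl
    (fun acc r =>
      let segs := (List.range w).foldl (hstepB grid r h) (PySem.Dict.empty, 0)
      segs.1.values.foldl
        (fun acc2 rec =>
          if 1 < rec.2.1 then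
            acc2 ++ [((r : Int), rec.1, rec.2.1, "H", rec.2.2.1, rec.2.2.2)]
          else acc2) acc) []
  let all := (List.range w).foldl
    (fun acc c =>
      let segs := (List.range h).foldl (vstepB grid c w) (PySem.Dict.empty, 0)
      segs.1.values.foldl
        (fun acc2 rec =>
          if 1 < rec.2.1 then
            acc2 ++ [(rec.1, (c : Int), rec.2.1, "V", rec.2.2.1, rec.2.2.2)]
          else acc2) acc) horiz
  PySem.List.sorted all pvKey

-- ===== PRECONDITION & SPEC =====
-- A raises IndexError iff the grid is empty (len(grid[0])) or some row is
-- shorter than row 0; Pre_ excludes exactly those inputs.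
def Pre_find_free_spaces (grid : List (List String)) : Prop :=
  grid ≠ [] ∧ ∀ row ∈ grid, (grid.getD 0 []).length ≤ row.length
instance (grid : List (List String)) : Decidable (Pre_find_free_spaces grid) := by
  unfold Pre_find_free_spaces; infer_instance

def pvWitness_find_free_spaces : List (List String) :=
  [["a", "?", "."], ["b", "?", "c"], [".", "x", "y"]]

def Spec_find_free_spaces (grid : List (List String)) (out : List (Int × Int × Int × String × Int × Int)) : Prop := out = find_free_spaces_alt grid
instance (grid : List (List String)) (out : List (Int × Int × Int × String × Int × Int)) : Decidable (Spec_find_free_spaces grid out) := by unfold Spec_find_free_spaces; infer_instance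

-- ===== CLAIM (what is proved, stated in full; the proofs are below) =====
def Claim_equal_find_free_spaces : Prop := ∀ (grid : List (List String)), Dom_find_free_spaces grid → Pre_find_free_spaces grid → Spec_find_free_spaces grid (find_free_spaces grid)

-- ===== LEMMAS AND PROOFS =====

-- first index ≥ c below `limit` at which p fails (end of the current run)
def runEnd (p : Nat → Prop) [DecidablePred p] (limit c : Nat) : Nat :=
  if hg : c < limit ∧ p c then runEnd p limit (c + 1) else c
termination_by limit - c
decreasing_by have := hg.1; omega

lemma runEnd_ge (p : Nat → Prop) [DecidablePred p] (limit c : Nat) :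
    c ≤ runEnd p limit c := by
  fun_induction runEnd with
  | case1 c hg ih => omega
  | case2 => simp

lemma runEnd_lt (p : Nat → Prop) [DecidablePred p] (limit c : Nat)
    (hc : c < limit) (hp : p c) : c < runEnd p limit c := by
  rw [runEnd, dif_pos ⟨hc, hp⟩]
  exact Nat.lt_of_lt_of_le (Nat.lt_succ_self c) (runEnd_ge p limit (c + 1))

-- the list of maximal runs of p starting at c
def pairs (p : Nat → Prop) [DecidablePred p] (limit c : Nat) : List (Nat × Nat) :=
  if hc : c < limit then
    if p c then (c, runEnd p limit c) :: pairs p limit (runEnd p limit c)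
    else pairs p limit (c + 1)
  else []
termination_by limit - c
decreasing_by
  · have := runEnd_lt p limit c hc (by assumption); omega
  · omega

-- count fixed letters of a horizontal stretch [s, e)
def fixedCntH (g : List (List String)) (row s e : Nat) : Int :=
  (((List.range' s (e - s)).countP (fun c => decide (pvCell g row c ≠ "?"))) : Int)

-- the intersections of a horizontal stretch [s, e)
def interCntH (g : List (List String)) (row h s e : Nat) : Int :=
  (((List.range' s (e - s)).countP
      (fun c => decide (0 < row ∧ pvCell g (row - 1) c ≠ "." ∧ pvCell g (row - 1) c ≠ "?"))) : Int)
  + (((List.range' s (e - s)).countP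
      (fun c => decide (row < h - 1 ∧ pvCell g (row + 1) c ≠ "." ∧ pvCell g (row + 1) c ≠ "?"))) : Int)

-- count fixed letters of a vertical stretch [s, e)
def fixedCntV (g : List (List String)) (col s e : Nat) : Int :=
  (((List.range' s (e - s)).countP (fun r => decide (pvCell g r col ≠ "?"))) : Int)

-- the intersections of a vertical stretch [s, e)
def interCntV (g : List (List String)) (col w s e : Nat) : Int :=
  (((List.range' s (e - s)).countP
      (fun r => decide (0 < col ∧ pvCell g r (col - 1) ≠ "." ∧ pvCell g r (col - 1) ≠ "?"))) : Int)
  + (((List.range' s (e - s)).countP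
      (fun r => decide (col < w - 1 ∧ pvCell g r (col + 1) ≠ "." ∧ pvCell g r (col + 1) ≠ "?"))) : Int)

lemma fixedCntH_step (g : List (List String)) (row col e : Nat) (hlt : col < e) :
    fixedCntH g row col e
      = (if pvCell g row col ≠ "?" then 1 else 0) + fixedCntH g row (col + 1) e := by
  unfold fixedCntH
  rw [show e - col = (e - (col + 1)) + 1 by omega, List.range'_succ, List.countP_cons]
  push_cast
  split_ifs with h1 <;> simp_all
  ring

lemma interCntH_step (g : List (List String)) (row h col e : Nat) (hlt : col < e) :
    interCntH g row h col e
      = (if 0 < row ∧ pvCell g (row - 1) col ≠ "." ∧ pvCell g (row - 1) col ≠ "?" then 1 else 0)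
      + (if row < h - 1 ∧ pvCell g (row + 1) col ≠ "." ∧ pvCell g (row + 1) col ≠ "?" then 1 else 0)
      + interCntH g row h (col + 1) e := by
  unfold interCntH
  rw [show e - col = (e - (col + 1)) + 1 by omega, List.range'_succ, List.countP_cons,
    List.countP_cons]
  push_cast
  split_ifs <;> simp_all <;> ring

lemma fixedCntV_step (g : List (List String)) (col row e : Nat) (hlt : row < e) :
    fixedCntV g col row e
      = (if pvCell g row col ≠ "?" then 1 else 0) + fixedCntV g col (row + 1) e := by
  unfold fixedCntV
  rw [show e - row = (e - (row + 1)) + 1 by omega, List.range'_succ, List.countP_cons]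
  push_cast
  split_ifs with h1 <;> simp_all
  ring

lemma interCntV_step (g : List (List String)) (col w row e : Nat) (hlt : row < e) :
    interCntV g col w row e
      = (if 0 < col ∧ pvCell g row (col - 1) ≠ "." ∧ pvCell g row (col - 1) ≠ "?" then 1 else 0)
      + (if col < w - 1 ∧ pvCell g row (col + 1) ≠ "." ∧ pvCell g row (col + 1) ≠ "?" then 1 else 0)
      + interCntV g col w (row + 1) e := by
  unfold interCntV
  rw [show e - row = (e - (row + 1)) + 1 by omega, List.range'_succ, List.countP_cons,
    List.countP_cons]
  push_cast
  split_ifs <;> simp_all <;> ring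

lemma fixedCntH_refl (g : List (List String)) (row e : Nat) : fixedCntH g row e e = 0 := by
  simp [fixedCntH]

lemma interCntH_refl (g : List (List String)) (row h e : Nat) : interCntH g row h e e = 0 := by
  simp [interCntH]

lemma fixedCntV_refl (g : List (List String)) (col e : Nat) : fixedCntV g col e e = 0 := by
  simp [fixedCntV]

lemma interCntV_refl (g : List (List String)) (col w e : Nat) : interCntV g col w e e = 0 := by
  simp [interCntV]

lemma hrunA_eq (g : List (List String)) (row h w : Nat) :
    ∀ fuel col f i, w - col ≤ fuel → hrunA g row h w fuel col f i =
      (runEnd (fun c => pvCell g row c ≠ ".") w col,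
       f + fixedCntH g row col (runEnd (fun c => pvCell g row c ≠ ".") w col),
       i + interCntH g row h col (runEnd (fun c => pvCell g row c ≠ ".") w col)) := by
  intro fuel
  induction fuel with
  | zero =>
    intro col f i hf
    have he : runEnd (fun c => pvCell g row c ≠ ".") w col = col := by
      rw [runEnd, dif_neg (by omega)]
    rw [hrunA, he]
    simp [fixedCntH, interCntH]
  | succ fuel ih =>
    intro col f i hf
    rw [hrunA]
    by_cases hc : col < w ∧ pvCell g row col ≠ "."
    · rw [if_pos hc]
      have he : runEnd (fun c => pvCell g row c ≠ ".") w col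
          = runEnd (fun c => pvCell g row c ≠ ".") w (col + 1) := by
        rw [runEnd, dif_pos hc]
      have hlt : col < runEnd (fun c => pvCell g row c ≠ ".") w col :=
        runEnd_lt _ w col hc.1 hc.2
      rw [ih (col + 1) _ _ (by omega), ← he]
      rw [fixedCntH_step g row col _ hlt, interCntH_step g row h col _ hlt]
      simp only [Prod.mk.injEq]
      refine ⟨trivial, ?_, ?_⟩ <;> split_ifs <;> ring
    · rw [if_neg hc]
      have he : runEnd (fun c => pvCell g row c ≠ ".") w col = col := by
        rw [runEnd, dif_neg hc]
      rw [he]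
      simp [fixedCntH, interCntH]

lemma hscanA_eq (g : List (List String)) (row h w : Nat) :
    ∀ fuel col acc, w - col ≤ fuel → hscanA g row h w fuel col acc =
      (pairs (fun c => pvCell g row c ≠ ".") w col).foldl
        (fun acc2 se =>
          if 1 < se.2 - se.1 then
            acc2 ++ [((row : Int), (se.1 : Int), ((se.2 - se.1 : Nat) : Int), "H",
              fixedCntH g row se.1 se.2, interCntH g row h se.1 se.2)]
          else acc2) acc := by
  intro fuel
  induction fuel with
  | zero =>
    intro col acc hf
    rw [hscanA, pairs, dif_neg (by omega)]
    simp
  | succ fuel ih =>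
    intro col acc hf
    rw [hscanA]
    by_cases hc : col < w
    · rw [if_pos hc]
      by_cases hd : pvCell g row col ≠ "."
      · rw [if_pos hd]
        have hr := hrunA_eq g row h w (fuel + 1) col 0 0 (by omega)
        have hlt : col < runEnd (fun c => pvCell g row c ≠ ".") w col :=
          runEnd_lt _ w col hc hd
        simp only [hr, zero_add]
        rw [ih _ _ (by omega)]
        conv_rhs => rw [pairs, dif_pos hc, if_pos hd]
        rw [List.foldl_cons]
      · rw [if_neg hd, ih _ _ (by omega)]
        conv_rhs => rw [pairs, dif_pos hc, if_neg hd]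
    · rw [if_neg hc]
      rw [pairs, dif_neg (by omega)]
      simp

lemma vrunA_eq (g : List (List String)) (col h w : Nat) :
    ∀ fuel row f i, h - row ≤ fuel → vrunA g col h w fuel row f i =
      (runEnd (fun r => pvCell g r col ≠ ".") h row,
       f + fixedCntV g col row (runEnd (fun r => pvCell g r col ≠ ".") h row),
       i + interCntV g col w row (runEnd (fun r => pvCell g r col ≠ ".") h row)) := by
  intro fuel
  induction fuel with
  | zero =>
    intro row f i hf
    have he : runEnd (fun r => pvCell g r col ≠ ".") h row = row := by
      rw [runEnd, dif_neg (by omega)]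
    rw [vrunA, he]
    simp [fixedCntV, interCntV]
  | succ fuel ih =>
    intro row f i hf
    rw [vrunA]
    by_cases hc : row < h ∧ pvCell g row col ≠ "."
    · rw [if_pos hc]
      have he : runEnd (fun r => pvCell g r col ≠ ".") h row
          = runEnd (fun r => pvCell g r col ≠ ".") h (row + 1) := by
        rw [runEnd, dif_pos hc]
      have hlt : row < runEnd (fun r => pvCell g r col ≠ ".") h row :=
        runEnd_lt _ h row hc.1 hc.2
      rw [ih (row + 1) _ _ (by omega), ← he]
      rw [fixedCntV_step g col row _ hlt, interCntV_step g col w row _ hlt]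
      simp only [Prod.mk.injEq]
      refine ⟨trivial, ?_, ?_⟩ <;> split_ifs <;> ring
    · rw [if_neg hc]
      have he : runEnd (fun r => pvCell g r col ≠ ".") h row = row := by
        rw [runEnd, dif_neg hc]
      rw [he]
      simp [fixedCntV, interCntV]

lemma vscanA_eq (g : List (List String)) (col h w : Nat) :
    ∀ fuel row acc, h - row ≤ fuel → vscanA g col h w fuel row acc =
      (pairs (fun r => pvCell g r col ≠ ".") h row).foldl
        (fun acc2 se =>
          if 1 < se.2 - se.1 then
            acc2 ++ [((se.1 : Int), (col : Int), ((se.2 - se.1 : Nat) : Int), "V",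
              fixedCntV g col se.1 se.2, interCntV g col w se.1 se.2)]
          else acc2) acc := by
  intro fuel
  induction fuel with
  | zero =>
    intro row acc hf
    rw [vscanA, pairs, dif_neg (by omega)]
    simp
  | succ fuel ih =>
    intro row acc hf
    rw [vscanA]
    by_cases hc : row < h
    · rw [if_pos hc]
      by_cases hd : pvCell g row col ≠ "."
      · rw [if_pos hd]
        have hr := vrunA_eq g col h w (fuel + 1) row 0 0 (by omega)
        have hlt : row < runEnd (fun r => pvCell g r col ≠ ".") h row :=
          runEnd_lt _ h row hc hd
        simp only [hr, zero_add]
        rw [ih _ _ (by omega)]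
        conv_rhs => rw [pairs, dif_pos hc, if_pos hd]
        rw [List.foldl_cons]
      · rw [if_neg hd, ih _ _ (by omega)]
        conv_rhs => rw [pairs, dif_pos hc, if_neg hd]
    · rw [if_neg hc]
      rw [pairs, dif_neg (by omega)]
      simp

-- the (key, record) items B's horizontal dict pass produces from position c on
def hitems (g : List (List String)) (r h w : Nat) (dots : Int) (c : Nat) :
    List (Int × (Int × Int × Int × Int)) :=
  if hc : c < w then
    if hp : pvCell g r c ≠ "." then
      (dots, ((c : Int),
        ((runEnd (fun i => pvCell g r i ≠ ".") w c - c : Nat) : Int),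
        fixedCntH g r c (runEnd (fun i => pvCell g r i ≠ ".") w c),
        interCntH g r h c (runEnd (fun i => pvCell g r i ≠ ".") w c)))
        :: hitems g r h w dots (runEnd (fun i => pvCell g r i ≠ ".") w c)
    else hitems g r h w (dots + 1) (c + 1)
  else []
termination_by w - c
decreasing_by
  · have := runEnd_lt (fun i => pvCell g r i ≠ ".") w c hc hp; omega
  · omega

-- the (key, record) items B's vertical dict pass produces from position r on
def vitems (g : List (List String)) (c h w : Nat) (dots : Int) (r : Nat) :
    List (Int × (Int × Int × Int × Int)) :=
  if hr : r < h then
    if hp : pvCell g r c ≠ "." then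
      (dots, ((r : Int),
        ((runEnd (fun i => pvCell g i c ≠ ".") h r - r : Nat) : Int),
        fixedCntV g c r (runEnd (fun i => pvCell g i c ≠ ".") h r),
        interCntV g c w r (runEnd (fun i => pvCell g i c ≠ ".") h r)))
        :: vitems g c h w dots (runEnd (fun i => pvCell g i c ≠ ".") h r)
    else vitems g c h w (dots + 1) (r + 1)
  else []
termination_by h - r
decreasing_by
  · have := runEnd_lt (fun i => pvCell g i c ≠ ".") h r hr hp; omega
  · omega

lemma hitems_snd (g : List (List String)) (r h w : Nat) :
    ∀ n c dots, w - c ≤ n →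
      (hitems g r h w dots c).map Prod.snd
        = (pairs (fun i => pvCell g r i ≠ ".") w c).map
            (fun se => ((se.1 : Int), ((se.2 - se.1 : Nat) : Int),
              fixedCntH g r se.1 se.2, interCntH g r h se.1 se.2)) := by
  intro n
  induction n with
  | zero =>
    intro c dots hn
    rw [hitems, dif_neg (by omega), pairs, dif_neg (by omega)]
    simp
  | succ n ihn =>
    intro c dots hn
    by_cases hc : c < w
    · by_cases hp : pvCell g r c ≠ "."
      · rw [hitems, dif_pos hc, dif_pos hp]
        conv_rhs => rw [pairs, dif_pos hc, if_pos hp]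
        have hlt := runEnd_lt (fun i => pvCell g r i ≠ ".") w c hc hp
        rw [List.map_cons, List.map_cons, ihn _ _ (by omega)]
      · rw [hitems, dif_pos hc, dif_neg hp]
        conv_rhs => rw [pairs, dif_pos hc, if_neg hp]
        exact ihn _ _ (by omega)
    · rw [hitems, dif_neg (by omega), pairs, dif_neg (by omega)]
      simp

lemma vitems_snd (g : List (List String)) (c h w : Nat) :
    ∀ n r dots, h - r ≤ n →
      (vitems g c h w dots r).map Prod.snd
        = (pairs (fun i => pvCell g i c ≠ ".") h r).map
            (fun se => ((se.1 : Int), ((se.2 - se.1 : Nat) : Int),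
              fixedCntV g c se.1 se.2, interCntV g c w se.1 se.2)) := by
  intro n
  induction n with
  | zero =>
    intro r dots hn
    rw [vitems, dif_neg (by omega), pairs, dif_neg (by omega)]
    simp
  | succ n ihn =>
    intro r dots hn
    by_cases hr : r < h
    · by_cases hp : pvCell g r c ≠ "."
      · rw [vitems, dif_pos hr, dif_pos hp]
        conv_rhs => rw [pairs, dif_pos hr, if_pos hp]
        have hlt := runEnd_lt (fun i => pvCell g i c ≠ ".") h r hr hp
        rw [List.map_cons, List.map_cons, ihn _ _ (by omega)]
      · rw [vitems, dif_pos hr, dif_neg hp]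
        conv_rhs => rw [pairs, dif_pos hr, if_neg hp]
        exact ihn _ _ (by omega)
    · rw [vitems, dif_neg (by omega), pairs, dif_neg (by omega)]
      simp

-- the dict fold of B's horizontal pass, characterised by hitems; the two parts are
-- the fresh-key state and the mid-run state (current key last in the dict)
lemma hfoldB_loop (g : List (List String)) (r h w : Nat) :
    ∀ n c, w - c ≤ n →
      (∀ (segs : PySem.Dict Int (Int × Int × Int × Int)) (dots : Int),
        segs.keys.Nodup → (∀ k ∈ segs.keys, k < dots) →
        ((List.range' c (w - c)).foldl (hstepB g r h) (segs, dots)).1.items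
          = segs.items ++ hitems g r h w dots c)
      ∧ (∀ (base : List (Int × (Int × Int × Int × Int))) (dots sv L F I : Int),
        (base.map Prod.fst ++ [dots]).Nodup → (∀ k ∈ base.map Prod.fst, k < dots) →
        ((List.range' c (w - c)).foldl (hstepB g r h)
            (PySem.Dict.mk (base ++ [(dots, (sv, L, F, I))]), dots)).1.items
          = base ++ [(dots, (sv,
              L + ((runEnd (fun i => pvCell g r i ≠ ".") w c - c : Nat) : Int),
              F + fixedCntH g r c (runEnd (fun i => pvCell g r i ≠ ".") w c),
              I + interCntH g r h c (runEnd (fun i => pvCell g r i ≠ ".") w c)))]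
            ++ hitems g r h w dots (runEnd (fun i => pvCell g r i ≠ ".") w c)) := by
  intro n
  induction n with
  | zero =>
    intro c hn
    have he : runEnd (fun i => pvCell g r i ≠ ".") w c = c := by
      rw [runEnd, dif_neg (by omega)]
    constructor
    · intro segs dots hnd hk
      rw [show w - c = 0 by omega, hitems, dif_neg (by omega)]
      simp
    · intro base dots sv L F I hnd hk
      rw [show w - c = 0 by omega, he, hitems, dif_neg (by omega)]
      simp [fixedCntH_refl, interCntH_refl]
  | succ n ihn =>
    intro c hn
    by_cases hc : c < w
    · have hrw : w - c = (w - (c + 1)) + 1 := by omega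
      by_cases hp : pvCell g r c ≠ "."
      · have he : runEnd (fun i => pvCell g r i ≠ ".") w c
            = runEnd (fun i => pvCell g r i ≠ ".") w (c + 1) := by
          rw [runEnd, dif_pos ⟨hc, hp⟩]
        have hlt : c < runEnd (fun i => pvCell g r i ≠ ".") w c :=
          runEnd_lt _ w c hc hp
        have hX1 : (1 : Int) + ((runEnd (fun i => pvCell g r i ≠ ".") w c - (c + 1) : Nat) : Int)
            = ((runEnd (fun i => pvCell g r i ≠ ".") w c - c : Nat) : Int) := by
          rw [show (runEnd (fun i => pvCell g r i ≠ ".") w c - c : Nat)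
              = (runEnd (fun i => pvCell g r i ≠ ".") w c - (c + 1)) + 1 by omega]
          push_cast; ring
        constructor
        · intro segs dots hnd hk
          have hcon : segs.contains dots = false := by
            rw [PySem.Dict.contains_eq_decide_mem_keys]
            simp only [decide_eq_false_iff_not]
            intro hm; exact absurd (hk _ hm) (lt_irrefl _)
          rw [hrw, List.range'_succ, List.foldl_cons]
          have hstep : hstepB g r h (segs, dots) c
              = (PySem.Dict.mk (segs.items ++ [(dots, ((c : Int), 1,
                  (if pvCell g r c ≠ "?" then (1 : Int) else 0),
                  (if 0 < r ∧ pvCell g (r - 1) c ≠ "." ∧ pvCell g (r - 1) c ≠ "?" then (1 : Int) else 0)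
                    + (if r < h - 1 ∧ pvCell g (r + 1) c ≠ "." ∧ pvCell g (r + 1) c ≠ "?" then 1 else 0)))]),
                 dots) := by
            simp only [hstepB]
            rw [if_neg hp]
            rw [if_neg (by simp [hcon])]
            rw [PySem.Dict.getD_insert_self, PySem.Dict.insert_insert_self]
            refine Prod.ext ?_ rfl
            apply PySem.Dict.ext
            rw [PySem.Dict.items_insert_of_not_contains _ _ hcon]
            norm_num
          rw [hstep]
          have hnd' : (segs.items.map Prod.fst ++ [dots]).Nodup := by
            rw [List.nodup_append]
            refine ⟨hnd, List.nodup_singleton _, ?_⟩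
            intro k hk1 k2 hk2
            rw [List.mem_singleton] at hk2
            subst hk2
            intro hEq
            subst hEq
            exact absurd (hk _ hk1) (lt_irrefl _)
          have hk' : ∀ k ∈ segs.items.map Prod.fst, k < dots := hk
          have h2 := (ihn (c + 1) (by omega)).2 segs.items dots (c : Int) 1
            (if pvCell g r c ≠ "?" then (1 : Int) else 0)
            ((if 0 < r ∧ pvCell g (r - 1) c ≠ "." ∧ pvCell g (r - 1) c ≠ "?" then (1 : Int) else 0)
              + (if r < h - 1 ∧ pvCell g (r + 1) c ≠ "." ∧ pvCell g (r + 1) c ≠ "?" then 1 else 0))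
            hnd' hk'
          rw [h2, ← he]
          conv_rhs => rw [hitems, dif_pos hc, dif_pos hp]
          rw [hX1, ← fixedCntH_step g r c _ hlt, ← interCntH_step g r h c _ hlt]
          simp
        · intro base dots sv L F I hnd hk
          have hkeys : (PySem.Dict.mk (base ++ [(dots, (sv, L, F, I))])).keys
              = base.map Prod.fst ++ [dots] := by
            simp [PySem.Dict.keys]
          have hcon : (PySem.Dict.mk (base ++ [(dots, (sv, L, F, I))])).contains dots = true := by
            rw [PySem.Dict.contains_eq_decide_mem_keys, hkeys]
            simp
          have hdots : dots ∉ base.map Prod.fst := by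
            have := hnd
            rw [List.nodup_append] at this
            intro hm
            exact this.2.2 dots hm dots (List.mem_singleton_self dots) rfl
          have hget : (PySem.Dict.mk (base ++ [(dots, (sv, L, F, I))])).getD dots (0, 0, 0, 0)
              = (sv, L, F, I) :=
            PySem.Dict.getD_of_mem_items _ (by simp) (hkeys ▸ hnd) _
          rw [hrw, List.range'_succ, List.foldl_cons]
          have hstep : hstepB g r h (PySem.Dict.mk (base ++ [(dots, (sv, L, F, I))]), dots) c
              = (PySem.Dict.mk (base ++ [(dots, (sv, L + 1,
                  (if pvCell g r c ≠ "?" then F + 1 else F),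
                  I + (if 0 < r ∧ pvCell g (r - 1) c ≠ "." ∧ pvCell g (r - 1) c ≠ "?" then 1 else 0)
                    + (if r < h - 1 ∧ pvCell g (r + 1) c ≠ "." ∧ pvCell g (r + 1) c ≠ "?" then 1 else 0)))]),
                 dots) := by
            simp only [hstepB]
            rw [if_neg hp, if_pos hcon, hget]
            refine Prod.ext ?_ rfl
            apply PySem.Dict.ext
            rw [PySem.Dict.items_insert_of_contains _ _ hcon]
            show List.map _ (base ++ [(dots, (sv, L, F, I))]) = _
            rw [List.map_append]
            congr 1
            · refine List.map_congr_left ?_ |>.trans (List.map_id base)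
              intro p hp2
              have : p.1 ≠ dots := fun hEq => hdots (hEq ▸ List.mem_map_of_mem hp2)
              simp [this]
            · simp
          rw [hstep]
          have h2 := (ihn (c + 1) (by omega)).2 base dots sv (L + 1)
            (if pvCell g r c ≠ "?" then F + 1 else F)
            (I + (if 0 < r ∧ pvCell g (r - 1) c ≠ "." ∧ pvCell g (r - 1) c ≠ "?" then 1 else 0)
              + (if r < h - 1 ∧ pvCell g (r + 1) c ≠ "." ∧ pvCell g (r + 1) c ≠ "?" then 1 else 0))
            hnd hk
          rw [h2, ← he]
          have hL : L + 1 + ((runEnd (fun i => pvCell g r i ≠ ".") w c - (c + 1) : Nat) : Int)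
              = L + ((runEnd (fun i => pvCell g r i ≠ ".") w c - c : Nat) : Int) := by
            rw [← hX1]; ring
          have hF : (if pvCell g r c ≠ "?" then F + 1 else F)
              + fixedCntH g r (c + 1) (runEnd (fun i => pvCell g r i ≠ ".") w c)
              = F + fixedCntH g r c (runEnd (fun i => pvCell g r i ≠ ".") w c) := by
            rw [fixedCntH_step g r c _ hlt]
            split_ifs <;> ring
          have hI : I + (if 0 < r ∧ pvCell g (r - 1) c ≠ "." ∧ pvCell g (r - 1) c ≠ "?" then 1 else 0)
              + (if r < h - 1 ∧ pvCell g (r + 1) c ≠ "." ∧ pvCell g (r + 1) c ≠ "?" then 1 else 0)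
              + interCntH g r h (c + 1) (runEnd (fun i => pvCell g r i ≠ ".") w c)
              = I + interCntH g r h c (runEnd (fun i => pvCell g r i ≠ ".") w c) := by
            rw [interCntH_step g r h c _ hlt]
            ring
          rw [hL, hF, hI]
      · have hpe : pvCell g r c = "." := not_not.mp hp
        have he : runEnd (fun i => pvCell g r i ≠ ".") w c = c := by
          rw [runEnd, dif_neg (by tauto)]
        constructor
        · intro segs dots hnd hk
          rw [hrw, List.range'_succ, List.foldl_cons]
          have hstep : hstepB g r h (segs, dots) c = (segs, dots + 1) := by
            simp only [hstepB]
            rw [if_pos hpe]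
          rw [hstep, (ihn (c + 1) (by omega)).1 segs (dots + 1) hnd
            (fun k hm => lt_trans (hk k hm) (lt_add_one dots))]
          conv_rhs => rw [hitems, dif_pos hc, dif_neg hp]
        · intro base dots sv L F I hnd hk
          rw [hrw, List.range'_succ, List.foldl_cons]
          have hstep : hstepB g r h (PySem.Dict.mk (base ++ [(dots, (sv, L, F, I))]), dots) c
              = (PySem.Dict.mk (base ++ [(dots, (sv, L, F, I))]), dots + 1) := by
            simp only [hstepB]
            rw [if_pos hpe]
          have hkeys : (PySem.Dict.mk (base ++ [(dots, (sv, L, F, I))])).keys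
              = base.map Prod.fst ++ [dots] := by
            simp [PySem.Dict.keys]
          have hk' : ∀ k ∈ (PySem.Dict.mk (base ++ [(dots, (sv, L, F, I))])).keys, k < dots + 1 := by
            intro k hm
            rw [hkeys, List.mem_append, List.mem_singleton] at hm
            rcases hm with hm | hm
            · exact lt_trans (hk _ hm) (lt_add_one dots)
            · omega
          rw [hstep, (ihn (c + 1) (by omega)).1 _ (dots + 1) (hkeys ▸ hnd) hk', he]
          conv_rhs => rw [hitems, dif_pos hc, dif_neg hp]
          simp [fixedCntH_refl, interCntH_refl]
    · have he : runEnd (fun i => pvCell g r i ≠ ".") w c = c := by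
        rw [runEnd, dif_neg (by omega)]
      constructor
      · intro segs dots hnd hk
        rw [show w - c = 0 by omega, hitems, dif_neg (by omega)]
        simp
      · intro base dots sv L F I hnd hk
        rw [show w - c = 0 by omega, he, hitems, dif_neg (by omega)]
        simp [fixedCntH_refl, interCntH_refl]

-- the dict fold of B's vertical pass, characterised by vitems, same two states
lemma vfoldB_loop (g : List (List String)) (c w h : Nat) :
    ∀ n r, h - r ≤ n →
      (∀ (segs : PySem.Dict Int (Int × Int × Int × Int)) (dots : Int),
        segs.keys.Nodup → (∀ k ∈ segs.keys, k < dots) →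
        ((List.range' r (h - r)).foldl (vstepB g c w) (segs, dots)).1.items
          = segs.items ++ vitems g c h w dots r)
      ∧ (∀ (base : List (Int × (Int × Int × Int × Int))) (dots sv L F I : Int),
        (base.map Prod.fst ++ [dots]).Nodup → (∀ k ∈ base.map Prod.fst, k < dots) →
        ((List.range' r (h - r)).foldl (vstepB g c w)
            (PySem.Dict.mk (base ++ [(dots, (sv, L, F, I))]), dots)).1.items
          = base ++ [(dots, (sv,
              L + ((runEnd (fun i => pvCell g i c ≠ ".") h r - r : Nat) : Int),
              F + fixedCntV g c r (runEnd (fun i => pvCell g i c ≠ ".") h r),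
              I + interCntV g c w r (runEnd (fun i => pvCell g i c ≠ ".") h r)))]
            ++ vitems g c h w dots (runEnd (fun i => pvCell g i c ≠ ".") h r)) := by
  intro n
  induction n with
  | zero =>
    intro r hn
    have he : runEnd (fun i => pvCell g i c ≠ ".") h r = r := by
      rw [runEnd, dif_neg (by omega)]
    constructor
    · intro segs dots hnd hk
      rw [show h - r = 0 by omega, vitems, dif_neg (by omega)]
      simp
    · intro base dots sv L F I hnd hk
      rw [show h - r = 0 by omega, he, vitems, dif_neg (by omega)]
      simp [fixedCntV_refl, interCntV_refl]
  | succ n ihn =>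
    intro r hn
    by_cases hc : r < h
    · have hrw : h - r = (h - (r + 1)) + 1 := by omega
      by_cases hp : pvCell g r c ≠ "."
      · have he : runEnd (fun i => pvCell g i c ≠ ".") h r
            = runEnd (fun i => pvCell g i c ≠ ".") h (r + 1) := by
          rw [runEnd, dif_pos ⟨hc, hp⟩]
        have hlt : r < runEnd (fun i => pvCell g i c ≠ ".") h r :=
          runEnd_lt _ h r hc hp
        have hX1 : (1 : Int) + ((runEnd (fun i => pvCell g i c ≠ ".") h r - (r + 1) : Nat) : Int)
            = ((runEnd (fun i => pvCell g i c ≠ ".") h r - r : Nat) : Int) := by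
          rw [show (runEnd (fun i => pvCell g i c ≠ ".") h r - r : Nat)
              = (runEnd (fun i => pvCell g i c ≠ ".") h r - (r + 1)) + 1 by omega]
          push_cast; ring
        constructor
        · intro segs dots hnd hk
          have hcon : segs.contains dots = false := by
            rw [PySem.Dict.contains_eq_decide_mem_keys]
            simp only [decide_eq_false_iff_not]
            intro hm; exact absurd (hk _ hm) (lt_irrefl _)
          rw [hrw, List.range'_succ, List.foldl_cons]
          have hstep : vstepB g c w (segs, dots) r
              = (PySem.Dict.mk (segs.items ++ [(dots, ((r : Int), 1,
                  (if pvCell g r c ≠ "?" then (1 : Int) else 0),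
                  (if 0 < c ∧ pvCell g r (c - 1) ≠ "." ∧ pvCell g r (c - 1) ≠ "?" then (1 : Int) else 0)
                    + (if c < w - 1 ∧ pvCell g r (c + 1) ≠ "." ∧ pvCell g r (c + 1) ≠ "?" then 1 else 0)))]),
                 dots) := by
            simp only [vstepB]
            rw [if_neg hp]
            rw [if_neg (by simp [hcon])]
            rw [PySem.Dict.getD_insert_self, PySem.Dict.insert_insert_self]
            refine Prod.ext ?_ rfl
            apply PySem.Dict.ext
            rw [PySem.Dict.items_insert_of_not_contains _ _ hcon]
            norm_num
          rw [hstep]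
          have hnd' : (segs.items.map Prod.fst ++ [dots]).Nodup := by
            rw [List.nodup_append]
            refine ⟨hnd, List.nodup_singleton _, ?_⟩
            intro k hk1 k2 hk2
            rw [List.mem_singleton] at hk2
            subst hk2
            intro hEq
            subst hEq
            exact absurd (hk _ hk1) (lt_irrefl _)
          have hk' : ∀ k ∈ segs.items.map Prod.fst, k < dots := hk
          have h2 := (ihn (r + 1) (by omega)).2 segs.items dots (r : Int) 1
            (if pvCell g r c ≠ "?" then (1 : Int) else 0)
            ((if 0 < c ∧ pvCell g r (c - 1) ≠ "." ∧ pvCell g r (c - 1) ≠ "?" then (1 : Int) else 0)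
              + (if c < w - 1 ∧ pvCell g r (c + 1) ≠ "." ∧ pvCell g r (c + 1) ≠ "?" then 1 else 0))
            hnd' hk'
          rw [h2, ← he]
          conv_rhs => rw [vitems, dif_pos hc, dif_pos hp]
          rw [hX1, ← fixedCntV_step g c r _ hlt, ← interCntV_step g c w r _ hlt]
          simp
        · intro base dots sv L F I hnd hk
          have hkeys : (PySem.Dict.mk (base ++ [(dots, (sv, L, F, I))])).keys
              = base.map Prod.fst ++ [dots] := by
            simp [PySem.Dict.keys]
          have hcon : (PySem.Dict.mk (base ++ [(dots, (sv, L, F, I))])).contains dots = true := by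
            rw [PySem.Dict.contains_eq_decide_mem_keys, hkeys]
            simp
          have hdots : dots ∉ base.map Prod.fst := by
            have := hnd
            rw [List.nodup_append] at this
            intro hm
            exact this.2.2 dots hm dots (List.mem_singleton_self dots) rfl
          have hget : (PySem.Dict.mk (base ++ [(dots, (sv, L, F, I))])).getD dots (0, 0, 0, 0)
              = (sv, L, F, I) :=
            PySem.Dict.getD_of_mem_items _ (by simp) (hkeys ▸ hnd) _
          rw [hrw, List.range'_succ, List.foldl_cons]
          have hstep : vstepB g c w (PySem.Dict.mk (base ++ [(dots, (sv, L, F, I))]), dots) r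
              = (PySem.Dict.mk (base ++ [(dots, (sv, L + 1,
                  (if pvCell g r c ≠ "?" then F + 1 else F),
                  I + (if 0 < c ∧ pvCell g r (c - 1) ≠ "." ∧ pvCell g r (c - 1) ≠ "?" then 1 else 0)
                    + (if c < w - 1 ∧ pvCell g r (c + 1) ≠ "." ∧ pvCell g r (c + 1) ≠ "?" then 1 else 0)))]),
                 dots) := by
            simp only [vstepB]
            rw [if_neg hp, if_pos hcon, hget]
            refine Prod.ext ?_ rfl
            apply PySem.Dict.ext
            rw [PySem.Dict.items_insert_of_contains _ _ hcon]
            show List.map _ (base ++ [(dots, (sv, L, F, I))]) = _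
            rw [List.map_append]
            congr 1
            · refine List.map_congr_left ?_ |>.trans (List.map_id base)
              intro p hp2
              have : p.1 ≠ dots := fun hEq => hdots (hEq ▸ List.mem_map_of_mem hp2)
              simp [this]
            · simp
          rw [hstep]
          have h2 := (ihn (r + 1) (by omega)).2 base dots sv (L + 1)
            (if pvCell g r c ≠ "?" then F + 1 else F)
            (I + (if 0 < c ∧ pvCell g r (c - 1) ≠ "." ∧ pvCell g r (c - 1) ≠ "?" then 1 else 0)
              + (if c < w - 1 ∧ pvCell g r (c + 1) ≠ "." ∧ pvCell g r (c + 1) ≠ "?" then 1 else 0))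
            hnd hk
          rw [h2, ← he]
          have hL : L + 1 + ((runEnd (fun i => pvCell g i c ≠ ".") h r - (r + 1) : Nat) : Int)
              = L + ((runEnd (fun i => pvCell g i c ≠ ".") h r - r : Nat) : Int) := by
            rw [← hX1]; ring
          have hF : (if pvCell g r c ≠ "?" then F + 1 else F)
              + fixedCntV g c (r + 1) (runEnd (fun i => pvCell g i c ≠ ".") h r)
              = F + fixedCntV g c r (runEnd (fun i => pvCell g i c ≠ ".") h r) := by
            rw [fixedCntV_step g c r _ hlt]
            split_ifs <;> ring
          have hI : I + (if 0 < c ∧ pvCell g r (c - 1) ≠ "." ∧ pvCell g r (c - 1) ≠ "?" then 1 else 0)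
              + (if c < w - 1 ∧ pvCell g r (c + 1) ≠ "." ∧ pvCell g r (c + 1) ≠ "?" then 1 else 0)
              + interCntV g c w (r + 1) (runEnd (fun i => pvCell g i c ≠ ".") h r)
              = I + interCntV g c w r (runEnd (fun i => pvCell g i c ≠ ".") h r) := by
            rw [interCntV_step g c w r _ hlt]
            ring
          rw [hL, hF, hI]
      · have hpe : pvCell g r c = "." := not_not.mp hp
        have he : runEnd (fun i => pvCell g i c ≠ ".") h r = r := by
          rw [runEnd, dif_neg (by tauto)]
        constructor
        · intro segs dots hnd hk
          rw [hrw, List.range'_succ, List.foldl_cons]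
          have hstep : vstepB g c w (segs, dots) r = (segs, dots + 1) := by
            simp only [vstepB]
            rw [if_pos hpe]
          rw [hstep, (ihn (r + 1) (by omega)).1 segs (dots + 1) hnd
            (fun k hm => lt_trans (hk k hm) (lt_add_one dots))]
          conv_rhs => rw [vitems, dif_pos hc, dif_neg hp]
        · intro base dots sv L F I hnd hk
          rw [hrw, List.range'_succ, List.foldl_cons]
          have hstep : vstepB g c w (PySem.Dict.mk (base ++ [(dots, (sv, L, F, I))]), dots) r
              = (PySem.Dict.mk (base ++ [(dots, (sv, L, F, I))]), dots + 1) := by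
            simp only [vstepB]
            rw [if_pos hpe]
          have hkeys : (PySem.Dict.mk (base ++ [(dots, (sv, L, F, I))])).keys
              = base.map Prod.fst ++ [dots] := by
            simp [PySem.Dict.keys]
          have hk' : ∀ k ∈ (PySem.Dict.mk (base ++ [(dots, (sv, L, F, I))])).keys, k < dots + 1 := by
            intro k hm
            rw [hkeys, List.mem_append, List.mem_singleton] at hm
            rcases hm with hm | hm
            · exact lt_trans (hk _ hm) (lt_add_one dots)
            · omega
          rw [hstep, (ihn (r + 1) (by omega)).1 _ (dots + 1) (hkeys ▸ hnd) hk', he]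
          conv_rhs => rw [vitems, dif_pos hc, dif_neg hp]
          simp [fixedCntV_refl, interCntV_refl]
    · have he : runEnd (fun i => pvCell g i c ≠ ".") h r = r := by
        rw [runEnd, dif_neg (by omega)]
      constructor
      · intro segs dots hnd hk
        rw [show h - r = 0 by omega, vitems, dif_neg (by omega)]
        simp
      · intro base dots sv L F I hnd hk
        rw [show h - r = 0 by omega, he, vitems, dif_neg (by omega)]
        simp [fixedCntV_refl, interCntV_refl]


-- B's per-row dict pass emits exactly what A's per-row scan appends
lemma hline_eq (grid : List (List String)) (acc : List (Int × Int × Int × String × Int × Int))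
    (r : Nat) :
    ((List.range (grid.getD 0 []).length).foldl (hstepB grid r grid.length)
        (PySem.Dict.empty, 0)).1.values.foldl
      (fun acc2 rec =>
        if 1 < rec.2.1 then
          acc2 ++ [((r : Int), rec.1, rec.2.1, "H", rec.2.2.1, rec.2.2.2)]
        else acc2) acc
      = hscanA grid r grid.length (grid.getD 0 []).length (grid.getD 0 []).length 0 acc := by
  rw [hscanA_eq grid r grid.length (grid.getD 0 []).length _ 0 acc (by omega)]
  rw [List.range_eq_range']
  have h0 := ((hfoldB_loop grid r grid.length (grid.getD 0 []).length)
      ((grid.getD 0 []).length) 0 (by omega)).1 PySem.Dict.empty 0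
      (by simp [PySem.Dict.keys_empty]) (by simp [PySem.Dict.keys_empty])
  have h0' : ((List.range' 0 (grid.getD 0 []).length).foldl (hstepB grid r grid.length)
      (PySem.Dict.empty, 0)).1.items
      = hitems grid r grid.length (grid.getD 0 []).length 0 0 := by simpa using h0
  have hval : ((List.range' 0 (grid.getD 0 []).length).foldl (hstepB grid r grid.length)
      (PySem.Dict.empty, 0)).1.values
      = (hitems grid r grid.length (grid.getD 0 []).length 0 0).map Prod.snd := by
    rw [← h0']; rfl
  rw [hval, hitems_snd grid r grid.length (grid.getD 0 []).length
    ((grid.getD 0 []).length) 0 0 (by omega), List.foldl_map]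
  refine PySem.List.foldl_congr_mem _ _ _ _ ?_
  intro acc2 se _
  dsimp only
  by_cases hgt : 1 < se.2 - se.1
  · rw [if_pos (by exact_mod_cast hgt), if_pos hgt]
  · rw [if_neg (by exact_mod_cast hgt), if_neg hgt]

lemma vline_eq (grid : List (List String)) (acc : List (Int × Int × Int × String × Int × Int))
    (c : Nat) :
    ((List.range grid.length).foldl (vstepB grid c (grid.getD 0 []).length)
        (PySem.Dict.empty, 0)).1.values.foldl
      (fun acc2 rec =>
        if 1 < rec.2.1 then
          acc2 ++ [(rec.1, (c : Int), rec.2.1, "V", rec.2.2.1, rec.2.2.2)]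
        else acc2) acc
      = vscanA grid c grid.length (grid.getD 0 []).length grid.length 0 acc := by
  rw [vscanA_eq grid c grid.length (grid.getD 0 []).length _ 0 acc (by omega)]
  rw [List.range_eq_range']
  have h0 := ((vfoldB_loop grid c (grid.getD 0 []).length grid.length)
      grid.length 0 (by omega)).1 PySem.Dict.empty 0
      (by simp [PySem.Dict.keys_empty]) (by simp [PySem.Dict.keys_empty])
  have h0' : ((List.range' 0 grid.length).foldl (vstepB grid c (grid.getD 0 []).length)
      (PySem.Dict.empty, 0)).1.items
      = vitems grid c grid.length (grid.getD 0 []).length 0 0 := by simpa using h0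
  have hval : ((List.range' 0 grid.length).foldl (vstepB grid c (grid.getD 0 []).length)
      (PySem.Dict.empty, 0)).1.values
      = (vitems grid c grid.length (grid.getD 0 []).length 0 0).map Prod.snd := by
    rw [← h0']; rfl
  rw [hval, vitems_snd grid c grid.length (grid.getD 0 []).length
    grid.length 0 0 (by omega), List.foldl_map]
  refine PySem.List.foldl_congr_mem _ _ _ _ ?_
  intro acc2 se _
  dsimp only
  by_cases hgt : 1 < se.2 - se.1
  · rw [if_pos (by exact_mod_cast hgt), if_pos hgt]
  · rw [if_neg (by exact_mod_cast hgt), if_neg hgt]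

-- ===== VERDICT (by name: the statement is the Claim_ definition above) =====
theorem find_free_spaces_spec : Claim_equal_find_free_spaces := by
  intro grid _ _
  unfold Spec_find_free_spaces
  simp only [find_free_spaces, find_free_spaces_alt]
  refine congrArg (fun l => PySem.List.sorted l pvKey) ?_
  refine Eq.symm ?_
  rw [PySem.List.foldl_congr_mem (List.range grid.length) _ _ []
    (fun acc x _ => hline_eq grid acc x)]
  exact PySem.List.foldl_congr_mem (List.range (grid.getD 0 []).length) _ _ _
    (fun acc x _ => vline_eq grid acc x)
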